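-- pv_equiv track=rewrite | github.com/schmitech/orbit | server/retrievers/implementations/intent/intent_athena_retriever.py | _escape_literal_percents_for_pyformat
-- ===== SOURCE A (Python) =====
-- from typing import Dict, Any, List, Optional
--
-- def _escape_literal_percents_for_pyformat(query: str) -> str:
--     """
--     Escape literal percent signs for pyformat queries while preserving placeholders.
--
--     Keeps:
--     - `%(name)s` placeholders
--     - existing `%%` escapes
--
--     Escapes:
--     - `%` in SQL string literals like `LIKE '%cloud%'`
--     """
--     out: List[str] = []
--     i = 0
--     n = len(query)
--
--     while i < n:
--         ch = query[i]
--         if ch != "%":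
--             out.append(ch)
--             i += 1
--             continue
--
--         # Already escaped percent
--         if i + 1 < n and query[i + 1] == "%":
--             out.append("%%")
--             i += 2
--             continue
--
--         # Placeholder start: %(name)s
--         if i + 1 < n and query[i + 1] == "(":
--             end_paren = query.find(")", i + 2)
--             if end_paren != -1 and end_paren + 1 < n and query[end_paren + 1] == "s":
--                 out.append(query[i:end_paren + 2])
--                 i = end_paren + 2
--                 continue
--
--         # Literal percent -> escape
--         out.append("%%")
--         i += 1
--
--     return "".join(out)
-- ===== SOURCE B (Python) =====
-- def _escape_literal_percents_for_pyformat(query: str) -> str: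
--     # Partition-driven scan: consume text up to each '%' in one step instead of
--     # per-character index arithmetic; same return value as the original.
--     out = []
--     rest = query
--     while rest:
--         head, sep, rest = rest.partition("%")
--         out.append(head)
--         if not sep:
--             break
--         if rest.startswith("%"):
--             out.append("%%")
--             rest = rest[1:]
--         elif rest.startswith("("):
--             body, rp, tail = rest[1:].partition(")")
--             if rp and tail.startswith("s"):
--                 out.append("%(" + body + ")s")
--                 rest = tail[1:]
--             else:
--                 out.append("%%")
--         else:
--             out.append("%%")
--     return "".join(out)
-- ===== Notes on version B (the rewrite author's own statement) =====
-- stated objective: faster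
-- what changed: Replaces the per-character while-loop with explicit index arithmetic and find() by a partition-driven scan that consumes whole chunks (text block up to the next '%', the placeholder body up to the first ')') per iteration.
import Mathlib
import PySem

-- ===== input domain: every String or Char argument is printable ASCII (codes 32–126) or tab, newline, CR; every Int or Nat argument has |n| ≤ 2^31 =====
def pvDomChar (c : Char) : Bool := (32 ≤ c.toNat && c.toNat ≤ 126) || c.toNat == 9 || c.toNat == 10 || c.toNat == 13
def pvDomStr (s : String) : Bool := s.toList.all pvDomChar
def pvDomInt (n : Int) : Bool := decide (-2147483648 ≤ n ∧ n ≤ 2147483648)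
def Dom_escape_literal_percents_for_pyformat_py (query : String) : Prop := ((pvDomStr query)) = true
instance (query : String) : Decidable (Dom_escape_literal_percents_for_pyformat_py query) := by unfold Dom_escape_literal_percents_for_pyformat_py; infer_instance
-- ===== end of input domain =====

-- B replaces A's per-character index loop (with find()) by a partition-driven scan
-- consuming whole chunks per step; return values proved equal on all inputs.


-- ===== PORT A =====
-- The while-loop over index i; fuel = n - i decreases by at least 1 each iteration,
-- so fuel := s.length makes the port exact.  `i+1 < n and query[i+1] == c` is ported
-- as s[i+1]? = some c (equivalent: the lookup is some iff the index is in range).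
def escGoA (s : List Char) (fuel : Nat) (i : Nat) (out : List (List Char)) : List (List Char) :=
  match fuel with
  | 0 => out
  | fuel + 1 =>
    if h : i < s.length then
      let ch := s[i]
      if ch ≠ '%' then
        escGoA s fuel (i + 1) (out ++ [[ch]])
      else if s[i+1]? = some '%' then
        escGoA s fuel (i + 2) (out ++ [['%', '%']])
      else if s[i+1]? = some '(' then
        let ep : Int := PySem.Chars.findFrom s [')'] ((i : Int) + 2)
        -- end_paren != -1 and end_paren+1 < n and query[end_paren+1] == 's'
        if ep ≠ -1 ∧ ep + 1 < (s.length : Int) ∧ s[(ep + 1).toNat]? = some 's' then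
          escGoA s fuel (ep + 2).toNat (out ++ [PySem.List.slice s (some (i : Int)) (some (ep + 2))])
        else
          escGoA s fuel (i + 1) (out ++ [['%', '%']])
      else
        escGoA s fuel (i + 1) (out ++ [['%', '%']])
    else out

-- "".join(out) on chunks of chars is flatten
def escape_literal_percents_for_pyformat_py (query : String) : String :=
  String.ofList (escGoA query.toList query.toList.length 0 []).flatten

-- ===== PORT B =====
-- Source B's partition loop: head,sep,rest = rest.partition("%") is takeWhile/dropWhile
-- at the first '%'; startswith on a 1-char prefix is head?.
def escGoB (l : List Char) : List Char :=
  let head := l.takeWhile (fun c => c ≠ '%')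
  let rest := l.dropWhile (fun c => c ≠ '%')      -- sep ++ rest of the Python partition
  if hr : rest.isEmpty then head                  -- no separator: break
  else
    let r1 := rest.tail                           -- what follows the '%'
    if r1.head? = some '%' then
      head ++ ['%', '%'] ++ escGoB r1.tail
    else if r1.head? = some '(' then
      let t := r1.tail.dropWhile (fun c => c ≠ ')')   -- ")" ++ tail of the inner partition
      if t.tail.head? = some 's' then                 -- rp and tail.startswith("s")
        head ++ ['%', '('] ++ r1.tail.takeWhile (fun c => c ≠ ')') ++ [')', 's'] ++ escGoB t.tail.tail
      else head ++ ['%', '%'] ++ escGoB r1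
    else head ++ ['%', '%'] ++ escGoB r1
termination_by l.length
decreasing_by
  all_goals
    have h1 := List.length_dropWhile_le (p := fun c => decide (c ≠ '%')) (l := l)
    simp only [List.isEmpty_iff] at hr
    have h2 : 0 < (List.dropWhile (fun c => decide (c ≠ '%')) l).length :=
      List.length_pos_of_ne_nil hr
    have h3 := List.length_dropWhile_le (p := fun c => decide (c ≠ ')'))
      (l := (List.dropWhile (fun c => decide (c ≠ '%')) l).tail.tail)
    simp [List.length_tail] at h1 h2 h3 ⊢
    omega

def escape_literal_percents_for_pyformat_py_alt (query : String) : String :=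
  String.ofList (escGoB query.toList)

-- ===== PRECONDITION & SPEC =====
def Spec_escape_literal_percents_for_pyformat_py (query : String) (out : String) : Prop := out = escape_literal_percents_for_pyformat_py_alt query
instance (query : String) (out : String) : Decidable (Spec_escape_literal_percents_for_pyformat_py query out) := by unfold Spec_escape_literal_percents_for_pyformat_py; infer_instance

-- ===== CLAIM (what is proved, stated in full; the proofs are below) =====
def Claim_equal_escape_literal_percents_for_pyformat_py : Prop := ∀ (query : String), Dom_escape_literal_percents_for_pyformat_py query → Spec_escape_literal_percents_for_pyformat_py query (escape_literal_percents_for_pyformat_py query)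

-- ===== LEMMAS AND PROOFS =====

lemma findGo_close (l : List Char) (k : Nat) :
    PySem.Chars.find.go [')'] l k =
      if (l.dropWhile (fun c => c ≠ ')')).isEmpty then -1
      else (k : Int) + (l.takeWhile (fun c => c ≠ ')')).length := by
  induction l generalizing k with
  | nil => simp [PySem.Chars.find.go]
  | cons c t ih =>
    by_cases hc : c = ')'
    · subst hc
      simp [PySem.Chars.find.go, List.isPrefixOf, List.dropWhile_cons, List.takeWhile_cons]
    · rw [PySem.Chars.find.go]
      have hpre : [')'].isPrefixOf (c :: t) = false := by
        simp [List.isPrefixOf]; exact fun h => (hc h.symm).elim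
      rw [hpre]
      simp only [Bool.false_eq_true, if_false]
      rw [ih (k + 1)]
      have hd : List.dropWhile (fun c => decide (c ≠ ')')) (c :: t)
          = List.dropWhile (fun c => decide (c ≠ ')')) t := by
        simp [List.dropWhile_cons, hc]
      have htk : List.takeWhile (fun c => decide (c ≠ ')')) (c :: t)
          = c :: List.takeWhile (fun c => decide (c ≠ ')')) t := by
        simp [List.takeWhile_cons, hc]
      rw [hd, htk]
      split
      · rfl
      · simp only [List.length_cons]; push_cast; ring

lemma escGoB_cons_ne (c : Char) (t : List Char) (h : c ≠ '%') :
    escGoB (c :: t) = c :: escGoB t := by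
  conv_lhs => rw [escGoB]
  conv_rhs => rw [escGoB]
  simp only [List.takeWhile_cons, List.dropWhile_cons, h, decide_not, decide_eq_true_eq,
    if_pos, if_neg, Bool.not_eq_true', decide_eq_false_iff_not, not_not]
  simp [h]
  split <;> [skip; split] <;> [simp; skip; split] <;> [simp; split <;> simp; simp]

lemma escGoB_pp (t : List Char) : escGoB ('%' :: '%' :: t) = '%' :: '%' :: escGoB t := by
  rw [escGoB]; simp

lemma escGoB_pct_nil : escGoB ['%'] = ['%', '%'] := by
  rw [escGoB]; simp [escGoB]

lemma escGoB_pct_other (c : Char) (t : List Char) (h1 : c ≠ '%') (h2 : c ≠ '(') :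
    escGoB ('%' :: c :: t) = '%' :: '%' :: escGoB (c :: t) := by
  rw [escGoB]; simp [h1, h2]

lemma escGoB_paren_none (r2 : List Char)
    (h : r2.dropWhile (fun c => decide (c ≠ ')')) = []) :
    escGoB ('%' :: '(' :: r2) = '%' :: '%' :: escGoB ('(' :: r2) := by
  rw [escGoB]
  simp only [ne_eq, decide_not] at h
  simp [h]

lemma escGoB_paren_no_s (r2 : List Char) (c0 : Char) (t1 : List Char)
    (h : r2.dropWhile (fun c => decide (c ≠ ')')) = c0 :: t1)
    (hs : t1.head? ≠ some 's') :
    escGoB ('%' :: '(' :: r2) = '%' :: '%' :: escGoB ('(' :: r2) := by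
  rw [escGoB]
  simp only [ne_eq, decide_not] at h
  simp [h, hs]

lemma escGoB_paren_s (r2 : List Char) (c0 : Char) (t1 : List Char)
    (h : r2.dropWhile (fun c => decide (c ≠ ')')) = c0 :: t1)
    (hs : t1.head? = some 's') :
    escGoB ('%' :: '(' :: r2)
      = ['%', '('] ++ r2.takeWhile (fun c => decide (c ≠ ')')) ++ [')', 's'] ++ escGoB t1.tail := by
  rw [escGoB]
  simp only [ne_eq, decide_not] at h
  simp [h, hs]

lemma escGoB_nil : escGoB [] = [] := by rw [escGoB]; simp

lemma find_close (l : List Char) :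
    PySem.Chars.find l [')'] =
      if (l.dropWhile (fun c => decide (c ≠ ')'))).isEmpty then -1
      else ((l.takeWhile (fun c => decide (c ≠ ')'))).length : Int) := by
  rw [PySem.Chars.find, findGo_close]
  split <;> simp

lemma main_loop (s : List Char) (fuel i : Nat) (out : List (List Char))
    (hf : s.length - i ≤ fuel) :
    (escGoA s fuel i out).flatten = out.flatten ++ escGoB (s.drop i) := by
  induction fuel generalizing i out with
  | zero =>
    have hge : s.length ≤ i := by omega
    rw [escGoA, List.drop_eq_nil_of_le hge, escGoB_nil]
    simp
  | succ fuel ih =>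
    rw [escGoA]
    by_cases h : i < s.length
    · simp only [dif_pos h]
      have hdrop : s.drop i = s[i] :: s.drop (i + 1) := List.drop_eq_getElem_cons h
      by_cases hch : s[i] = '%'
      · simp only [hch, ne_eq, not_true_eq_false, if_false]
        cases h1 : s[i + 1]? with
        | none =>
          have hn : s.length ≤ i + 1 := by
            by_contra hlt
            exact absurd h1 (by simp [List.getElem?_eq_getElem (by omega : i + 1 < s.length)])
          simp only [h1, reduceCtorEq, if_false]
          rw [ih (i + 1) _ (by omega)]
          rw [hdrop, hch, List.drop_eq_nil_of_le hn, escGoB_pct_nil, escGoB_nil]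
          simp
        | some c =>
          have hi1 : i + 1 < s.length := by
            by_contra hlt
            rw [List.getElem?_eq_none (by omega)] at h1; exact absurd h1 (by simp)
          have hc1 : s[i + 1] = c := by
            rw [List.getElem?_eq_getElem hi1] at h1; exact Option.some.inj h1
          have hdrop1 : s.drop (i + 1) = c :: s.drop (i + 2) := by
            rw [List.drop_eq_getElem_cons hi1, hc1]
          by_cases hcp : c = '%'
          · simp only [h1, hcp, if_pos]
            rw [ih (i + 2) _ (by omega)]
            rw [hdrop, hch, hdrop1, hcp, escGoB_pp]
            simp
          · by_cases hco : c = '('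
            · -- placeholder branch
              subst hco
              simp only [h1, hcp, reduceCtorEq, if_false, Option.some.injEq, if_pos, if_true]
              have hk : ((i : Int) + 2) = ((i + 2 : Nat) : Int) := by push_cast; ring
              have hff := PySem.Chars.findFrom_natCast s [')'] (i + 2) (by omega)
              rw [find_close (s.drop (i + 2))] at hff
              rw [hk, hff]
              cases hdw : (s.drop (i + 2)).dropWhile (fun c => decide (c ≠ ')')) with
              | nil =>
                simp only [List.isEmpty_nil, if_pos, if_true, reduceIte]
                rw [if_neg (by simp)]
                rw [ih (i + 1) _ (by omega)]
                rw [hdrop, hch, hdrop1, escGoB_paren_none _ hdw, ← hdrop1]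
                simp
              | cons c0 t1 =>
                set tw := (s.drop (i + 2)).takeWhile (fun c => decide (c ≠ ')')) with htw
                set j := tw.length with hj
                simp only [List.isEmpty_cons, Bool.false_eq_true, if_false, reduceIte]
                rw [if_neg (show ¬((j : Int) = -1) by omega)]
                have hsplit : tw ++ (c0 :: t1) = s.drop (i + 2) := by
                  rw [htw, ← hdw]; exact List.takeWhile_append_dropWhile
                have hc0 : c0 = ')' := by
                  have hne : (s.drop (i + 2)).dropWhile (fun c => decide (c ≠ ')')) ≠ [] := by
                    rw [hdw]; simp
                  have h8 := List.head_dropWhile_not (fun c => decide (c ≠ ')')) hne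
                  simp only [hdw, List.head_cons] at h8
                  simpa using h8
                have hdj : s.drop (i + 2 + j) = c0 :: t1 := by
                  have h5 : (s.drop (i + 2)).drop j = c0 :: t1 := by
                    conv_lhs => rw [← hsplit, hj]
                    exact List.drop_left
                  rw [← h5, List.drop_drop]
                have hidx : s[i + 2 + j + 1]? = t1.head? := by
                  have h6 : (s.drop (i + 2 + j))[1]? = s[i + 2 + j + 1]? := List.getElem?_drop
                  rw [← h6, hdj]
                  cases t1 <;> simp
                have hep1 : (((i + 2 : Nat) : Int) + (j : Int) + 1).toNat = i + 2 + j + 1 := by omega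
                by_cases hs : t1.head? = some 's'
                · -- valid placeholder
                  have hsome : s[i + 2 + j + 1]? = some 's' := by rw [hidx, hs]
                  have hlt : i + 2 + j + 1 < s.length := by
                    rcases List.getElem?_eq_some_iff.mp hsome with ⟨hh, _⟩; exact hh
                  rw [if_pos ⟨by omega, by push_cast; omega, by rw [hep1, hsome]⟩]
                  obtain ⟨t2, ht2⟩ : ∃ t2, t1 = 's' :: t2 := by
                    cases ht : t1 with
                    | nil => rw [ht] at hs; simp at hs
                    | cons a b => rw [ht] at hs; simp at hs; exact ⟨b, by rw [hs]⟩
                  have hslice : PySem.List.slice s (some (i : Int)) (some (((i + 2 : Nat) : Int) + (j : Int) + 2))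
                      = '%' :: '(' :: (tw ++ [')', 's']) := by
                    have hcast : ((i + 2 : Nat) : Int) + (j : Int) + 2 = ((i + 4 + j : Nat) : Int) := by push_cast; ring
                    rw [hcast, PySem.List.slice_natCast]
                    rw [hdrop, hch, hdrop1]
                    rw [(by omega : i + 4 + j - i = j + 2 + 1 + 1)]
                    simp only [List.take_succ_cons]
                    rw [← hsplit, (by omega : j + 2 = tw.length + 2), List.take_append]
                    simp [ht2, hc0, List.take_of_length_le]
                  rw [hslice]
                  have htn : ((((i + 2 : Nat) : Int) + (j : Int)) + 2).toNat = i + 4 + j := by omega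
                  rw [htn]
                  rw [ih (i + 4 + j) _ (by omega)]
                  have hdj2 : s.drop (i + 4 + j) = t1.tail := by
                    have h7 : (s.drop (i + 2 + j)).drop 2 = s.drop (i + 2 + j + 2) := List.drop_drop
                    rw [(by omega : i + 4 + j = i + 2 + j + 2), ← h7, hdj, ht2]; simp
                  rw [hdj2]
                  rw [hdrop, hch, hdrop1, escGoB_paren_s _ c0 t1 hdw hs]
                  simp
                  rw [htw]
                  simp only [ne_eq, decide_not]
                · -- not a placeholder: the three-way condition is false
                  rw [if_neg (by
                    rintro ⟨-, -, h3'⟩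
                    rw [hep1, hidx] at h3'
                    exact hs h3')]
                  rw [ih (i + 1) _ (by omega)]
                  rw [hdrop, hch, hdrop1, escGoB_paren_no_s _ c0 t1 hdw hs, ← hdrop1]
                  simp
            · -- literal branch
              simp only [h1, Option.some.injEq, hcp, hco, if_false]
              rw [ih (i + 1) _ (by omega)]
              rw [hdrop, hch, hdrop1, escGoB_pct_other c _ hcp hco, ← hdrop1]
              simp
      · simp only [hch, ne_eq, not_false_eq_true, if_true]
        rw [ih (i + 1) _ (by omega)]
        rw [hdrop, escGoB_cons_ne _ _ hch]
        simp
    · simp only [dif_neg h]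
      rw [List.drop_eq_nil_of_le (by omega), escGoB_nil]
      simp

-- ===== VERDICT (by name: the statement is the Claim_ definition above) =====
theorem escape_literal_percents_for_pyformat_py_spec : Claim_equal_escape_literal_percents_for_pyformat_py := by
  intro q _
  unfold Spec_escape_literal_percents_for_pyformat_py
  unfold escape_literal_percents_for_pyformat_py escape_literal_percents_for_pyformat_py_alt
  have h := main_loop q.toList q.toList.length 0 [] (by omega)
  simp at h
  simp [h]
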